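-- pv_equiv track=rewrite | github.com/Xin-DongXu/AF3Parallel | AF3__GPU_Memory_Time-Series_Profiler.py | _smiles_heavy_atoms
-- ===== SOURCE A (Python) =====
-- _SMILES_ORGANIC = set("BCNOPSFI") | set("bcnops")
--
-- def _smiles_heavy_atoms(smiles: str) -> int:
--     """Count heavy (non-H) atoms in a SMILES string without RDKit.
--
--     Handles:
--       - organic-subset atoms outside brackets (B, C, N, O, P, S, F, Cl, Br, I);
--       - aromatic lowercase (b, c, n, o, p, s);
--       - bracketed atoms [Fe], [CH4], [14C@H], [Ce+3] etc.;
--       - isotope and charge specifications inside brackets.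
--
--     Returns at least 1 for any non-empty input -- AF3 charges 1 token per
--     heavy atom, so an unparseable single-atom ligand still consumes a token.
--     """
--     if not smiles:
--         return 0
--     n = len(smiles)
--     i = 0
--     count = 0
--     while i < n:
--         ch = smiles[i]
--         if ch == "[":
--             j = i + 1
--             while j < n and smiles[j] != "]":
--                 j += 1
--             inner = smiles[i + 1:j]
--             # skip leading isotope digits
--             k = 0
--             while k < len(inner) and inner[k].isdigit():
--                 k += 1
--             rest = inner[k:]
--             if rest:
--                 # element symbol is 1 or 2 letters, second letter lowercase
--                 if len(rest) >= 2 and rest[0].isalpha() and rest[1].islower():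
--                     elem = rest[:2]
--                 else:
--                     elem = rest[:1]
--                 if elem.upper() != "H":
--                     count += 1
--             i = j + 1
--             continue
--         if ch.isalpha():
--             # two-letter organic-subset elements outside brackets
--             if (ch in ("C", "B")
--                     and i + 1 < n
--                     and smiles[i + 1] in ("l", "r")):
--                 count += 1
--                 i += 2
--                 continue
--             if ch in _SMILES_ORGANIC:
--                 count += 1
--             i += 1
--             continue
--         # bonds, ring closures, parentheses, stereo markers, '%', digits, etc.
--         i += 1
--     return max(count, 1)
-- ===== SOURCE B (Python) =====
-- import re
--
-- # Tokenize with a regex instead of index-walking: one findall yields all atom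
-- # tokens (bracket groups, two-letter Cl/Br-style pairs, single organic letters),
-- # then each token is scored independently.
-- _ATOM_TOKEN = re.compile(r'\[[^\]]*\]?|[CB][lr]|[BCNOPSFIbcnops]')
--
--
-- def _smiles_heavy_atoms(smiles: str) -> int:
--     if not smiles:
--         return 0
--     count = 0
--     for tok in _ATOM_TOKEN.findall(smiles):
--         if tok.startswith('['):
--             inner = tok[1:-1] if tok.endswith(']') else tok[1:]
--             rest = inner.lstrip('0123456789')
--             if not rest:
--                 continue
--             if len(rest) >= 2 and rest[0].isalpha() and rest[1].islower():
--                 elem = rest[:2]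
--             else:
--                 elem = rest[:1]
--             if elem.upper() != 'H':
--                 count += 1
--         else:
--             count += 1
--     return max(count, 1)
-- ===== Notes on version B (the rewrite author's own statement) =====
-- stated objective: idiomatic
-- what changed: Replaces the manual index-walking state machine with a compiled-regex tokenizer: one re.findall yields the atom tokens (bracket groups, two-letter CB/lr pairs, single organic letters), which are then scored independently in a simple loop.
import Mathlib
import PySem

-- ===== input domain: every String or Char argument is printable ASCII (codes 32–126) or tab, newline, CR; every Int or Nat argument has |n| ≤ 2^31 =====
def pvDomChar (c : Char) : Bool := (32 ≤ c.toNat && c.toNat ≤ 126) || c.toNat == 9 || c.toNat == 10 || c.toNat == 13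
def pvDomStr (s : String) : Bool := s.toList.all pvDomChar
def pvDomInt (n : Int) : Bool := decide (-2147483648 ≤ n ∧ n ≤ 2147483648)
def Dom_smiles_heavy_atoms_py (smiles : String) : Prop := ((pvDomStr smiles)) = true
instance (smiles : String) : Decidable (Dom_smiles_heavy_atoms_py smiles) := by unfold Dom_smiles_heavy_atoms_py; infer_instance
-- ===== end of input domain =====

-- B tokenizes the SMILES with a regex-style scanner into a list of atom tokens and scores each token,
-- instead of A's single index-walking loop; same values everywhere, objective: idiomatic.

-- ===== PORT A =====
-- _SMILES_ORGANIC = set("BCNOPSFI") | set("bcnops")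
def pvOrganic : List Char := ['B','C','N','O','P','S','F','I','b','c','n','o','p','s']

-- the bracket body of A's loop: skip isotope digits, take the 1/2-letter element, test against 'H'
def pvAInnerScore (inner : List Char) : Int :=
  let rest := inner.dropWhile (fun d => d.isDigit)
  match rest with
  | [] => 0
  | r0 :: rtl =>
    let elem := match rtl with
      | r1 :: _ => if r0.isAlpha && r1.isLower then [r0, r1] else [r0]
      | [] => [r0]
    if elem.map Char.toUpper ≠ ['H'] then 1 else 0

-- A's while-loop over index i, transliterated as recursion on the remaining suffix
def pvALoop : List Char → Int
  | [] => 0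
  | c :: cs =>
    if c = '[' then
      -- inner = smiles[i+1:j] with j the next ']' (or end); continue at j+1
      pvAInnerScore (cs.takeWhile (fun d => d ≠ ']')) + pvALoop (cs.dropWhile (fun d => d ≠ ']')).tail
    else if c.isAlpha then
      if (c = 'C' ∨ c = 'B') ∧ cs.head?.any (fun c2 => c2 = 'l' || c2 = 'r') then
        1 + pvALoop cs.tail
      else
        (if pvOrganic.contains c then 1 else 0) + pvALoop cs
    else pvALoop cs
  termination_by cs => cs.length
  decreasing_by
  · have := List.length_dropWhile_le (fun d => !decide (d = ']')) cs
    simp [List.length_tail]; omega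
  · simp [List.length_tail]
  · simp
  · simp

def smiles_heavy_atoms_py (smiles : String) : Int :=
  if smiles.toList = [] then 0 else max (pvALoop smiles.toList) 1

-- ===== PORT B =====
def pvBOrganic : List Char := ['B','C','N','O','P','S','F','I','b','c','n','o','p','s']

-- re.findall(r'\[[^\]]*\]?|[CB][lr]|[BCNOPSFIbcnops]', smiles): leftmost scan emitting atom tokens
def pvBTokenize : List Char → List (List Char)
  | [] => []
  | c :: cs =>
    if c = '[' then
      let body := cs.takeWhile (fun d => d ≠ ']')
      if cs.dropWhile (fun d => d ≠ ']') = [] then ['[' :: body]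
      else ('[' :: body ++ [']']) :: pvBTokenize (cs.dropWhile (fun d => d ≠ ']')).tail
    else if (c = 'C' ∨ c = 'B') ∧ cs.head?.any (fun c2 => c2 = 'l' || c2 = 'r') then
      (c :: cs.take 1) :: pvBTokenize cs.tail
    else if pvBOrganic.contains c then
      [c] :: pvBTokenize cs
    else pvBTokenize cs
  termination_by cs => cs.length
  decreasing_by
  · have := List.length_dropWhile_le (fun d => !decide (d = ']')) cs
    simp [List.length_tail]; omega
  · simp [List.length_tail]
  · simp
  · simp

-- strip the isotope digits of a bracket interior and score its element symbol against 'H'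
def pvBInnerScore (inner : List Char) : Int :=
  let rest := inner.dropWhile (fun d => d.isDigit)
  match rest with
  | [] => 0
  | r0 :: rtl =>
    let elem := match rtl with
      | r1 :: _ => if r0.isAlpha && r1.isLower then [r0, r1] else [r0]
      | [] => [r0]
    if elem.map Char.toUpper ≠ ['H'] then 1 else 0

-- score of one findall token (B's loop body)
def pvBScore (tok : List Char) : Int :=
  if tok.head? = some '[' then
    pvBInnerScore (if tok.getLast? = some ']' then (tok.drop 1).dropLast else tok.drop 1)
  else 1

def smiles_heavy_atoms_py_alt (smiles : String) : Int :=
  if smiles.toList = [] then 0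
  else max ((pvBTokenize smiles.toList).foldl (fun acc t => acc + pvBScore t) 0) 1

-- ===== PRECONDITION & SPEC =====
def Spec_smiles_heavy_atoms_py (smiles : String) (out : Int) : Prop := out = smiles_heavy_atoms_py_alt smiles
instance (smiles : String) (out : Int) : Decidable (Spec_smiles_heavy_atoms_py smiles out) := by unfold Spec_smiles_heavy_atoms_py; infer_instance

-- ===== CLAIM (what is proved, stated in full; the proofs are below) =====
def Claim_equal_smiles_heavy_atoms_py : Prop := ∀ (smiles : String), Dom_smiles_heavy_atoms_py smiles → Spec_smiles_heavy_atoms_py smiles (smiles_heavy_atoms_py smiles)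

-- ===== LEMMAS AND PROOFS =====

-- a token opened by '[' whose body (no ']' inside) is not closed does not end with ']'
theorem pv_open_last (body : List Char) (hb : ∀ x ∈ body, ¬x = ']') :
    ('[' :: body).getLast? ≠ some ']' := by
  intro h
  have hm : ']' ∈ '[' :: body := List.mem_of_getLast? h
  rcases List.mem_cons.mp hm with h1 | h1
  · exact absurd h1.symm (by decide)
  · exact hb _ h1 rfl

theorem pvOrganic_alpha {c : Char} (h : pvBOrganic.contains c = true) : c.isAlpha = true := by
  simp [pvBOrganic] at h
  rcases h with rfl|rfl|rfl|rfl|rfl|rfl|rfl|rfl|rfl|rfl|rfl|rfl|rfl|rfl <;> decide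

-- both ports score a bracket interior by the same computation
theorem pvAB : pvAInnerScore = pvBInnerScore := rfl

theorem pvBScore_open (body : List Char) (h : ('[' :: body).getLast? ≠ some ']') :
    pvBScore ('[' :: body) = pvBInnerScore body := by
  unfold pvBScore
  simp [h]

theorem pvBScore_closed (body : List Char) :
    pvBScore ('[' :: (body ++ [']'])) = pvBInnerScore body := by
  have h1 : ('[' :: (body ++ [']'])).getLast? = some ']' := by
    rw [← List.cons_append]; exact List.getLast?_concat
  unfold pvBScore
  rw [h1]
  simp

theorem pvBScore_atom {c : Char} {tl : List Char} (h : ¬c = '[') : pvBScore (c :: tl) = 1 := by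
  unfold pvBScore
  simp [h]

-- A's loop equals the sum of B's token scores
theorem pv_main (cs : List Char) : pvALoop cs = ((pvBTokenize cs).map pvBScore).sum := by
  induction cs using pvBTokenize.induct
  case case1 => simp [pvALoop, pvBTokenize]
  case case2 rtl h =>
    rw [pvALoop, pvBTokenize]
    have hlast := pv_open_last (List.takeWhile (fun d => d ≠ ']') rtl)
      (fun x hx => by simpa using List.mem_takeWhile_imp hx)
    simp only [ne_eq, decide_not] at h hlast
    simp [h, pvBScore_open _ hlast, pvAB, pvALoop]
  case case3 rtl h ih =>
    rw [pvALoop, pvBTokenize]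
    rw [if_neg h]
    simp only [ne_eq, decide_not] at ih
    simp [pvBScore_closed, pvAB, ih]
  case case4 r0 rtl hb hc ih =>
    rw [pvALoop, pvBTokenize]
    have halpha : r0.isAlpha = true := by
      rcases hc.1 with rfl | rfl <;> decide
    simp [hb, hc, halpha, pvBScore_atom hb, ih]
  case case5 r0 rtl hb hc ho ih =>
    rw [pvALoop, pvBTokenize]
    have hm : r0 ∈ pvBOrganic := by simpa using ho
    have hm' : r0 ∈ pvOrganic := hm
    simp [hb, hc, pvOrganic_alpha ho, hm, hm', pvBScore_atom hb, ih]
  case case6 r0 rtl hb hc ho ih =>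
    rw [pvALoop, pvBTokenize]
    have hm : r0 ∉ pvBOrganic := by simpa using ho
    have hm' : r0 ∉ pvOrganic := hm
    by_cases ha : r0.isAlpha = true
    · simp [hb, hc, ha, hm, hm', ih]
    · simp [hb, hc, ha, hm, ih]

-- ===== VERDICT (by name: the statement is the Claim_ definition above) =====
theorem smiles_heavy_atoms_py_spec : Claim_equal_smiles_heavy_atoms_py := by
  intro s _
  show smiles_heavy_atoms_py s = smiles_heavy_atoms_py_alt s
  unfold smiles_heavy_atoms_py smiles_heavy_atoms_py_alt
  by_cases h : s.toList = []
  · rw [if_pos h, if_pos h]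
  · rw [if_neg h, if_neg h, pv_main]
    rw [PySem.List.foldl_add]
    simp
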